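-- pv_equiv track=rewrite | github.com/HIEUDV066/PYTHON-PTIT | maHoa3.py | DRM
-- ===== SOURCE A (Python) =====
-- s = 'ABCDEFGHIJKLMNOPQRSTUVWXYZ'
--
-- def Devid(str):
-- 	str1=str[0:len(str)//2]
-- 	str2=str[len(str)//2:]
-- 	return str1,str2
--
-- def Rotate(str):
-- 	k=0
-- 	s1=''
-- 	for i in str:
-- 		k += s.find(i)
-- 	for i in str:
-- 		s1 += s[(s.find(i)+k)%26]
-- 	return s1
--
-- def DRM(str):
-- 	str1,str2 = Devid(str)
-- 	s1 = Rotate(str1)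
-- 	s2 = Rotate(str2)
-- 	s3 = ''
-- 	for i in range(len(s1)):
-- 		s3 +=s[(s.find(s1[i])+s.find(s2[i]))%26]
-- 	return s3
-- ===== SOURCE B (Python) =====
-- s = 'ABCDEFGHIJKLMNOPQRSTUVWXYZ'
--
-- def DRM(str):
--     h = len(str) // 2
--     k = sum(s.find(c) for c in str)
--     return ''.join(s[(s.find(a) + s.find(b) + k) % 26] for a, b in zip(str[:h], str[h:]))
-- ===== Notes on version B (the rewrite author's own statement) =====
-- stated objective: simpler
-- what changed: B drops the Devid/Rotate intermediate strings entirely: it computes the total shift k = sum of alphabet indices over the whole string once, then produces each output character in a single zip pass over the two halves via the closed-form residue (find(a)+find(b)+k) % 26.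
import Mathlib
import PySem

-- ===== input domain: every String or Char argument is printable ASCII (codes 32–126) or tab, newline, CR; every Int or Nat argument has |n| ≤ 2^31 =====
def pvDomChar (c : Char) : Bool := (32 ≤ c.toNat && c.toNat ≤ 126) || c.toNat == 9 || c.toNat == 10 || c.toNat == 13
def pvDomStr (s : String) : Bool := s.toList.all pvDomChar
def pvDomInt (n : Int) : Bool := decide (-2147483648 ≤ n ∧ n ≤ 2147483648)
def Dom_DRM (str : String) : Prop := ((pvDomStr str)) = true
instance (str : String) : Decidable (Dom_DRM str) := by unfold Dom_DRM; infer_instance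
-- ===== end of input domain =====

-- B replaces the two Rotate passes plus the combine loop by one zip pass with a single precomputed shift k (objective: simpler).

-- the module-level alphabet s
def pvS : List Char := "ABCDEFGHIJKLMNOPQRSTUVWXYZ".toList
-- s.find(c) for a single character c
def pvFind (c : Char) : Int := PySem.Chars.find pvS [c]

-- ===== PORT A =====
def Devid (str : String) : String × String :=
  let l := str.toList
  let h : Int := PySem.Int.floordiv (PySem.Str.len str) 2
  (String.ofList (PySem.List.slice l (some 0) (some h)),
   String.ofList (PySem.List.slice l (some h) none))
def Rotate (t : String) : String :=
  let k : Int := t.toList.foldl (fun k c => k + pvFind c) 0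
  String.ofList (t.toList.foldl
    (fun s1 c => s1 ++ [PySem.List.pyGetD pvS (PySem.Int.mod (pvFind c + k) 26) 'A']) [])
def DRM (str : String) : String :=
  let p := Devid str
  let s1 := (Rotate p.1).toList
  let s2 := (Rotate p.2).toList
  String.ofList ((PySem.List.pyRange 0 (s1.length : Int) 1).foldl
    (fun s3 i => s3 ++ [PySem.List.pyGetD pvS
      (PySem.Int.mod (pvFind (PySem.List.pyGetD s1 i 'A') + pvFind (PySem.List.pyGetD s2 i 'A')) 26) 'A']) [])
-- ===== PORT B =====
def DRM_alt (str : String) : String :=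
  let l := str.toList
  let h : Int := PySem.Int.floordiv (PySem.Str.len str) 2
  let k : Int := (l.map pvFind).sum
  String.ofList (((PySem.List.slice l none (some h)).zip (PySem.List.slice l (some h) none)).map
    (fun p => PySem.List.pyGetD pvS (PySem.Int.mod (pvFind p.1 + pvFind p.2 + k) 26) 'A'))

-- ===== PRECONDITION & SPEC =====
def Spec_DRM (str : String) (out : String) : Prop := out = DRM_alt str
instance (str : String) (out : String) : Decidable (Spec_DRM str out) := by unfold Spec_DRM; infer_instance

-- ===== CLAIM (what is proved, stated in full; the proofs are below) =====
def Claim_equal_DRM : Prop := ∀ (str : String), Dom_DRM str → Spec_DRM str (DRM str)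

-- ===== LEMMAS AND PROOFS =====

-- find on the alphabet inverts indexing by a reduced residue
theorem pvFind_pyGetD_mod (x : Int) :
    pvFind (PySem.List.pyGetD pvS (PySem.Int.mod x 26) 'A') = PySem.Int.mod x 26 := by
  have h0 : 0 ≤ PySem.Int.mod x 26 := PySem.Int.mod_nonneg x (by norm_num)
  have h1 : PySem.Int.mod x 26 < 26 := PySem.Int.mod_lt x (by norm_num)
  obtain ⟨k, hk⟩ : ∃ k : Nat, PySem.Int.mod x 26 = (k : Int) :=
    ⟨(PySem.Int.mod x 26).toNat, (Int.toNat_of_nonneg h0).symm⟩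
  rw [hk]
  have hk26 : k < 26 := by omega
  interval_cases k <;> decide


-- ===== VERDICT (by name: the statement is the Claim_ definition above) =====
theorem DRM_spec : Claim_equal_DRM := by
  intro str _
  show DRM str = DRM_alt str
  unfold DRM DRM_alt Devid Rotate
  simp only [PySem.Str.len_eq, String.toList_ofList]
  generalize hl : str.toList = l
  obtain ⟨m, hm⟩ : ∃ m : Nat, PySem.Int.floordiv (l.length : Int) 2 = (m : Int) :=
    ⟨l.length / 2, by exact_mod_cast PySem.Int.floordiv_natCast l.length 2⟩
  rw [hm]
  rw [PySem.List.slice_zero_start, PySem.List.slice_to_natCast, PySem.List.slice_from_natCast]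
  rw [PySem.List.foldl_append_singleton_eq_map, PySem.List.foldl_append_singleton_eq_map]
  rw [PySem.List.foldl_append_singleton_eq_map]
  simp only [List.nil_append, List.length_map]
  have hm3 : m = l.length / 2 := by
    have h' : (m:Int) = ((l.length/2:Nat):Int) := by
      rw [← hm]; exact_mod_cast PySem.Int.floordiv_natCast l.length 2
    exact_mod_cast h'
  have hlen : (List.take m l).length ≤ (List.drop m l).length := by
    rw [List.length_take, List.length_drop]; omega
  have kfold : ∀ t : List Char, List.foldl (fun k c => k + pvFind c) 0 t = (t.map pvFind).sum := by
    intro t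
    rw [List.sum_eq_foldl, List.foldl_map]
  have ksplit : (List.map pvFind l).sum
      = (List.map pvFind (l.take m)).sum + (List.map pvFind (l.drop m)).sum := by
    conv_lhs => rw [← List.take_append_drop m l]
    rw [List.map_append, List.sum_append]
  apply congrArg String.ofList
  apply List.ext_getElem
  · simp [PySem.List.length_pyRange_one]
    omega
  · intro i h1 h2
    have hi : i < (l.take m).length := by
      simpa [PySem.List.length_pyRange_one] using h1
    have hi2 : i < (l.drop m).length := Nat.lt_of_lt_of_le hi hlen
    simp only [List.getElem_map, PySem.List.getElem_pyRange_one,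
      List.getElem_zip]
    rw [show (0:Int) + (i:Int) = ((i:Nat):Int) by omega]
    rw [PySem.List.pyGetD_natCast, PySem.List.pyGetD_natCast]
    rw [List.getD_eq_getElem?_getD, List.getD_eq_getElem?_getD]
    rw [List.getElem?_map, List.getElem?_map]
    rw [List.getElem?_eq_getElem hi, List.getElem?_eq_getElem hi2]
    simp only [Option.map_some, Option.getD_some]
    rw [kfold, kfold, pvFind_pyGetD_mod, pvFind_pyGetD_mod]
    congr 1
    simp only [PySem.Int.mod_eq_emod_of_pos (by norm_num : (0:Int) < 26)]
    omega
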